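-- pv_equiv track=rewrite | github.com/qiboteam/qibochem | example/grouping.py | generate_entangled_measurements
-- ===== SOURCE A (Python) =====
-- def generate_entangled_measurements(measurements, entanglements=None):
--     """
--     Generate the set of possible measurements for each qubit. Only considering TPB and Bell at the moment
--
--     Args:
--         measurements (dict): TPB measurements, e.g. {1: "X", 2: "Z", ...}
--         entanglement_type: Type of entangled measurements to consider. Currently only Bell measurements implemented
--
--     Returns:
--         (dict): Keys are qubits, values are the possible measurements (TPB and Bell) for that qubit
--     """
--     if entanglements is None:
--         entanglements = (("X", "X"), ("Y", "Y"), ("Z", "Z"))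
--
--     result = {
--         qubit: [
--             measurement,
--         ]
--         for qubit, measurement in measurements.items()
--     }
--     for _i, (qubit1, measurement1) in enumerate(measurements.items()):
--         for _j, (qubit2, measurement2) in enumerate(measurements.items()):
--             if _j > _i:
--                 if (measurement1, measurement2) in entanglements:
--                     # Change the measurement to a Bell measurement if possible
--                     if f"Bell{qubit1}{qubit2}" not in result[qubit1]:
--                         result[qubit1].append(f"Bell{qubit1}{qubit2}")
--                     if f"Bell{qubit1}{qubit2}" not in result[qubit2]:
--                         result[qubit2].append(f"Bell{qubit1}{qubit2}")
--     return result
-- ===== SOURCE B (Python) =====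
-- def generate_entangled_measurements(measurements, entanglements=None):
--     """Per-qubit decomposition: each qubit's measurement list is computed
--     independently from one scan of its predecessors and one of its successors,
--     instead of A's mutual pairwise appends into a shared dict."""
--     if entanglements is None:
--         entanglements = (("X", "X"), ("Y", "Y"), ("Z", "Z"))
--
--     items = list(measurements.items())
--     result = {}
--     for k, (q, mq) in enumerate(items):
--         lst = [mq]
--         for p, mp in items[:k]:
--             if (mp, mq) in entanglements:
--                 s = f"Bell{p}{q}"
--                 if s not in lst:
--                     lst.append(s)
--         for r, mr in items[k + 1:]:
--             if (mq, mr) in entanglements: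
--                 s = f"Bell{q}{r}"
--                 if s not in lst:
--                     lst.append(s)
--         result[q] = lst
--     return result
-- ===== Notes on version B (the rewrite author's own statement) =====
-- stated objective: alternative
-- what changed: B builds each qubit's measurement list independently (one scan of its predecessors, then one of its successors) instead of A's nested enumerate loops that push Bell strings into two shared dict entries per pair.
import Mathlib
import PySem

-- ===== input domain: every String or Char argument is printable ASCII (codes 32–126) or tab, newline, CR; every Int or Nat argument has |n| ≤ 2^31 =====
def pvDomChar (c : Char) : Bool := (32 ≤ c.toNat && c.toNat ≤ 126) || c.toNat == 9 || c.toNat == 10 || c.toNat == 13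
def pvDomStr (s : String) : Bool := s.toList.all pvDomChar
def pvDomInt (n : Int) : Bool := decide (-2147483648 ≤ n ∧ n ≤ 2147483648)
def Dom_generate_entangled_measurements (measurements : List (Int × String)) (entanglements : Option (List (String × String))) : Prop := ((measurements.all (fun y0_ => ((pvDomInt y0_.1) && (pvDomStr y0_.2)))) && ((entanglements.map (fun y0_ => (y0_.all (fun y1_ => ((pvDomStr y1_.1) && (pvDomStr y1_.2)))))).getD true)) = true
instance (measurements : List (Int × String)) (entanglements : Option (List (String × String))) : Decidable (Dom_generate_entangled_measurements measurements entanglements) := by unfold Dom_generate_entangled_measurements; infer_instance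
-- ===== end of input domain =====

-- B computes each qubit's measurement list independently from one scan of its predecessors
-- and one of its successors, instead of A's nested enumerate loops pushing into a shared dict.

-- ===== PORT A =====
-- f"Bell{qubit1}{qubit2}" (qubits are ints)
def pvBellA (q1 q2 : Int) : String := "Bell" ++ PySem.Int.toStr q1 ++ PySem.Int.toStr q2

-- the guarded append:  if s not in lst: lst.append(s)
def pvAppA (lst : List String) (s : String) : List String :=
  if s ∈ lst then lst else lst ++ [s]

-- result[q] guarded-append s, on the association list (first matching key; keys are unique, see Pre_)
def pvUpdA : List (Int × List String) → Int → String → List (Int × List String)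
  | [], _, _ => []
  | (k, v) :: rest, q, s => if k = q then (k, pvAppA v s) :: rest else (k, v) :: pvUpdA rest q s

def generate_entangled_measurements (measurements : List (Int × String)) (entanglements : Option (List (String × String))) : List (Int × List String) :=
  let ent := entanglements.getD [("X", "X"), ("Y", "Y"), ("Z", "Z")]
  let result := measurements.map (fun p => (p.1, [p.2]))
  (PySem.List.enumerate measurements 0).foldl (fun res ip =>
    (PySem.List.enumerate measurements 0).foldl (fun res jp =>
      if ip.1 < jp.1 then
        if (ip.2.2, jp.2.2) ∈ ent then
          pvUpdA (pvUpdA res ip.2.1 (pvBellA ip.2.1 jp.2.1)) jp.2.1 (pvBellA ip.2.1 jp.2.1)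
        else res
      else res) res) result

-- ===== PORT B =====
def pvBellB (q1 q2 : Int) : String := "Bell" ++ PySem.Int.toStr q1 ++ PySem.Int.toStr q2

-- if s not in lst: lst.append(s)
def pvPushB (lst : List String) (s : String) : List String :=
  if s ∈ lst then lst else lst ++ [s]

-- one qubit's list: [mq], then its predecessors items[:k], then its successors items[k+1:]
def pvEntryB (ent : List (String × String)) (items : List (Int × String)) (k q : Int) (mq : String) : List String :=
  let lst1 := (PySem.List.slice items none (some k)).foldl
    (fun lst pm => if (pm.2, mq) ∈ ent then pvPushB lst (pvBellB pm.1 q) else lst) [mq]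
  (PySem.List.slice items (some (k + 1)) none).foldl
    (fun lst pm => if (mq, pm.2) ∈ ent then pvPushB lst (pvBellB q pm.1) else lst) lst1

def generate_entangled_measurements_alt (measurements : List (Int × String)) (entanglements : Option (List (String × String))) : List (Int × List String) :=
  let ent := entanglements.getD [("X", "X"), ("Y", "Y"), ("Z", "Z")]
  (PySem.List.enumerate measurements 0).map (fun kp => (kp.2.1, pvEntryB ent measurements kp.1 kp.2.1 kp.2.2))

-- ===== PRECONDITION & SPEC =====
-- Pre_ excludes association lists with duplicate qubit keys: they do not represent a Python
-- dict (A's argument type), so Python A never receives them.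
def Pre_generate_entangled_measurements (measurements : List (Int × String)) (_entanglements : Option (List (String × String))) : Prop :=
  (measurements.map Prod.fst).Nodup

instance (measurements : List (Int × String)) (entanglements : Option (List (String × String))) : Decidable (Pre_generate_entangled_measurements measurements entanglements) := by unfold Pre_generate_entangled_measurements; infer_instance

def pvWitness_generate_entangled_measurements : (List (Int × String)) × (Option (List (String × String))) :=
  ([(1, "X"), (2, "X"), (3, "Z")], none)

def Spec_generate_entangled_measurements (measurements : List (Int × String)) (entanglements : Option (List (String × String))) (out : List (Int × List String)) : Prop := out = generate_entangled_measurements_alt measurements entanglements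
instance (measurements : List (Int × String)) (entanglements : Option (List (String × String))) (out : List (Int × List String)) : Decidable (Spec_generate_entangled_measurements measurements entanglements out) := by unfold Spec_generate_entangled_measurements; infer_instance

-- ===== CLAIM (what is proved, stated in full; the proofs are below) =====
def Claim_equal_generate_entangled_measurements : Prop := ∀ (measurements : List (Int × String)) (entanglements : Option (List (String × String))), Dom_generate_entangled_measurements measurements entanglements → Pre_generate_entangled_measurements measurements entanglements → Spec_generate_entangled_measurements measurements entanglements (generate_entangled_measurements measurements entanglements)

-- ===== LEMMAS AND PROOFS =====

-- the two (key, Bell-string) updates one ordered pair contributes in A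
def pvGG (ent : List (String × String)) (x y : Int × String) : List (Int × String) :=
  if (x.2, y.2) ∈ ent then [(x.1, pvBellA x.1 y.1), (y.1, pvBellA x.1 y.1)] else []

-- A's full update stream, pairs in A's (i, j) order
def pvOps (ent : List (String × String)) : List (Int × String) → List (Int × String)
  | [] => []
  | x :: l => l.flatMap (pvGG ent x) ++ pvOps ent l

def pvApply (res : List (Int × List String)) (ops : List (Int × String)) : List (Int × List String) :=
  ops.foldl (fun r op => pvUpdA r op.1 op.2) res

-- the strings an update stream sends to key q, in order
def pvFor (q : Int) (ops : List (Int × String)) : List String :=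
  ops.filterMap (fun op => if op.1 = q then some op.2 else none)

-- A's double loop as structural recursion on the item list
def pvPF (ent : List (String × String)) : List (Int × String) → List (Int × List String) → List (Int × List String)
  | [], r => r
  | x :: l, r => pvPF ent l (l.foldl (fun r y =>
      if (x.2, y.2) ∈ ent then
        pvUpdA (pvUpdA r x.1 (pvBellA x.1 y.1)) y.1 (pvBellA x.1 y.1)
      else r) r)

theorem pvApply_append (r : List (Int × List String)) (a b : List (Int × String)) :
    pvApply r (a ++ b) = pvApply (pvApply r a) b := List.foldl_append ..

-- the inner enumerate loop with guard i < j is a fold over a suffix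
theorem pv_enum_fold {α : Type} (g : α → (Int × String) → α) :
    ∀ (l : List (Int × String)) (s c : Nat) (res : α),
    (PySem.List.enumerate l (s : Int)).foldl
      (fun r jp => if (c : Int) < jp.1 then g r jp.2 else r) res
    = (l.drop (c + 1 - s)).foldl g res := by
  intro l
  induction l with
  | nil => intro s c res; simp [PySem.List.enumerate_nil]
  | cons x l ih =>
    intro s c res
    rw [PySem.List.enumerate_cons]
    simp only [List.foldl_cons]
    have hcast : ((s : Int) + 1) = ((s + 1 : Nat) : Int) := by push_cast; ring
    by_cases h : c < s
    · have hc : ((c : Int) < (s : Int)) := by exact_mod_cast h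
      rw [if_pos hc, hcast, ih (s + 1) c (g res x)]
      have h1 : c + 1 - (s + 1) = 0 := by omega
      have h2 : c + 1 - s = 0 := by omega
      rw [h1, h2]
      simp
    · have hc : ¬ ((c : Int) < (s : Int)) := by exact_mod_cast h
      rw [if_neg hc, hcast, ih (s + 1) c res]
      have h1 : c + 1 - (s + 1) = c - s := by omega
      have h2 : c + 1 - s = (c - s) + 1 := by omega
      rw [h1, h2, List.drop_succ_cons]

theorem pv_enum_fold0 {α : Type} (g : α → (Int × String) → α)
    (l : List (Int × String)) (c : Nat) (res : α) :
    (PySem.List.enumerate l 0).foldl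
      (fun r jp => if (c : Int) < jp.1 then g r jp.2 else r) res
    = (l.drop (c + 1)).foldl g res := by
  have := pv_enum_fold g l 0 c res
  simpa using this

-- A's nested folds equal pvPF on the item list
theorem pv_outer (ent : List (String × String)) (ms : List (Int × String)) :
    ∀ (l : List (Int × String)) (s : Nat) (res : List (Int × List String)), ms.drop s = l →
    (PySem.List.enumerate l (s : Int)).foldl (fun res ip =>
      (PySem.List.enumerate ms 0).foldl (fun res jp =>
        if ip.1 < jp.1 then
          if (ip.2.2, jp.2.2) ∈ ent then
            pvUpdA (pvUpdA res ip.2.1 (pvBellA ip.2.1 jp.2.1)) jp.2.1 (pvBellA ip.2.1 jp.2.1)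
          else res
        else res) res) res
    = pvPF ent l res := by
  intro l
  induction l with
  | nil => intro s res h; simp [PySem.List.enumerate_nil, pvPF]
  | cons x l ih =>
    intro s res h
    rw [PySem.List.enumerate_cons]
    simp only [List.foldl_cons]
    have hstep :
        (PySem.List.enumerate ms 0).foldl (fun r jp =>
          if (s : Int) < jp.1 then
            if (x.2, jp.2.2) ∈ ent then
              pvUpdA (pvUpdA r x.1 (pvBellA x.1 jp.2.1)) jp.2.1 (pvBellA x.1 jp.2.1)
            else r
          else r) res
        = (ms.drop (s + 1)).foldl (fun r y =>
            if (x.2, y.2) ∈ ent then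
              pvUpdA (pvUpdA r x.1 (pvBellA x.1 y.1)) y.1 (pvBellA x.1 y.1)
            else r) res :=
      pv_enum_fold0 (fun r y =>
        if (x.2, y.2) ∈ ent then
          pvUpdA (pvUpdA r x.1 (pvBellA x.1 y.1)) y.1 (pvBellA x.1 y.1)
        else r) ms s res
    have hdrop : ms.drop (s + 1) = l := by
      rw [← List.tail_drop, h, List.tail_cons]
    have hcast : ((s : Int) + 1) = ((s + 1 : Nat) : Int) := by push_cast; ring
    rw [hstep, hdrop, hcast, ih (s + 1) _ hdrop]
    rfl

-- one outer iteration is pvApply of its pvGG stream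
theorem pv_foldl_gg (ent : List (String × String)) (x : Int × String) :
    ∀ (l : List (Int × String)) (r : List (Int × List String)),
    l.foldl (fun r y =>
      if (x.2, y.2) ∈ ent then
        pvUpdA (pvUpdA r x.1 (pvBellA x.1 y.1)) y.1 (pvBellA x.1 y.1)
      else r) r
    = pvApply r (l.flatMap (pvGG ent x)) := by
  intro l
  induction l with
  | nil => intro r; simp [pvApply]
  | cons y l ih =>
    intro r
    rw [List.foldl_cons, List.flatMap_cons, pvApply_append, ih]
    congr 1
    by_cases h : (x.2, y.2) ∈ ent
    · simp [pvGG, pvApply, h]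
    · simp [pvGG, pvApply, h]

theorem pv_PF_apply (ent : List (String × String)) :
    ∀ (l : List (Int × String)) (r : List (Int × List String)),
    pvPF ent l r = pvApply r (pvOps ent l) := by
  intro l
  induction l with
  | nil => intro r; simp [pvPF, pvOps, pvApply]
  | cons x l ih =>
    intro r
    show pvPF ent l _ = _
    rw [ih, pv_foldl_gg, pvOps, pvApply_append]

-- applying a stream past a head entry: the head collects its own strings, the rest see the others
theorem pvApply_nil : ∀ ops : List (Int × String), pvApply [] ops = [] := by
  intro ops
  induction ops with
  | nil => rfl
  | cons op ops ih => exact ih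

theorem pv_head : ∀ (ops : List (Int × String)) (k : Int) (v : List String) (rest : List (Int × List String)),
    pvApply ((k, v) :: rest) ops
    = (k, (pvFor k ops).foldl pvAppA v) :: pvApply rest (ops.filter (fun op => decide ¬(op.1 = k))) := by
  intro ops
  induction ops with
  | nil => intro k v rest; simp [pvApply, pvFor]
  | cons op ops ih =>
    intro k v rest
    show pvApply (pvUpdA ((k, v) :: rest) op.1 op.2) ops = _
    by_cases h : k = op.1
    · have h' : op.1 = k := h.symm
      rw [show pvUpdA ((k, v) :: rest) op.1 op.2 = (k, pvAppA v op.2) :: rest by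
        simp [pvUpdA, h]]
      rw [ih]
      simp [pvFor, h', pvApply]
    · have h' : ¬ (op.1 = k) := fun hh => h hh.symm
      rw [show pvUpdA ((k, v) :: rest) op.1 op.2 = (k, v) :: pvUpdA rest op.1 op.2 by
        simp [pvUpdA, h]]
      rw [ih]
      simp only [pvFor, List.filterMap_cons, List.filter_cons, h', decide_not]
      simp [pvApply]

theorem pv_for_filter (q k : Int) (h : q ≠ k) :
    ∀ ops : List (Int × String),
    pvFor q (ops.filter (fun op => decide ¬(op.1 = k))) = pvFor q ops := by
  intro ops
  induction ops with
  | nil => simp [pvFor]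
  | cons op ops ih =>
    simp only [pvFor, List.filter_cons, List.filterMap_cons, decide_not] at *
    by_cases hk : op.1 = k
    · have hq : ¬ (op.1 = q) := fun hh => h ((hh ▸ hk : q = k))
      simp only [hq, if_false]
      simpa [hk] using ih
    · simp only [hk, decide_false, Bool.not_false, if_true, List.filterMap_cons]
      cases hq : (if op.1 = q then some op.2 else none) <;> simp [ih]

-- A's result: every entry collects exactly its own strings, in order
theorem pv_apply_map :
    ∀ (ls : List (Int × String)) (ops : List (Int × String)), (ls.map Prod.fst).Nodup →
    pvApply (ls.map (fun p => (p.1, [p.2]))) ops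
    = ls.map (fun p => (p.1, (pvFor p.1 ops).foldl pvAppA [p.2])) := by
  intro ls
  induction ls with
  | nil => intro ops _; simp only [List.map_nil]; exact pvApply_nil ops
  | cons p ls ih =>
    intro ops h
    simp only [List.map_cons, List.nodup_cons, List.mem_map] at h
    rw [List.map_cons, pv_head, ih _ h.2, List.map_cons]
    congr 1
    apply List.map_congr_left
    intro p' hp'
    have hne : p'.1 ≠ p.1 := by
      intro hh
      exact h.1 ⟨p', hp', hh⟩
    rw [pv_for_filter p'.1 p.1 hne]

theorem pv_for_flatMap (q : Int) (g : (Int × String) → List (Int × String)) :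
    ∀ l : List (Int × String),
    pvFor q (l.flatMap g) = l.flatMap (fun y => pvFor q (g y)) := by
  intro l
  induction l with
  | nil => simp [pvFor]
  | cons y l ih => simp only [List.flatMap_cons, pvFor, List.filterMap_append] at *; rw [ih]

theorem pv_for_gg_ne (ent : List (String × String)) (q : Int) (x y : Int × String)
    (hx : x.1 ≠ q) (hy : y.1 ≠ q) : pvFor q (pvGG ent x y) = [] := by
  unfold pvGG
  split <;> simp [pvFor, hx, hy]

theorem pv_for_gg_hit1 (ent : List (String × String)) (q : Int) (mq : String) (x : Int × String)
    (hx : x.1 ≠ q) :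
    pvFor q (pvGG ent x (q, mq)) = if (x.2, mq) ∈ ent then [pvBellA x.1 q] else [] := by
  unfold pvGG
  split <;> simp [pvFor, hx]

theorem pv_for_gg_hit2 (ent : List (String × String)) (q : Int) (mq : String) (y : Int × String)
    (hy : y.1 ≠ q) :
    pvFor q (pvGG ent (q, mq) y) = if (mq, y.2) ∈ ent then [pvBellA q y.1] else [] := by
  unfold pvGG
  split <;> simp [pvFor, hy]

theorem pv_ops_none (ent : List (String × String)) (q : Int) :
    ∀ l : List (Int × String), q ∉ l.map Prod.fst → pvFor q (pvOps ent l) = [] := by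
  intro l
  induction l with
  | nil => intro _; simp [pvOps, pvFor]
  | cons x l ih =>
    intro h
    simp only [List.map_cons, List.mem_cons, not_or] at h
    show pvFor q (l.flatMap (pvGG ent x) ++ pvOps ent l) = []
    simp only [pvFor, List.filterMap_append] at *
    rw [show (List.filterMap (fun op => if op.1 = q then some op.2 else none) (pvOps ent l)) = [] from ih h.2]
    rw [show (List.filterMap (fun op => if op.1 = q then some op.2 else none) (l.flatMap (pvGG ent x))) = pvFor q (l.flatMap (pvGG ent x)) from rfl]
    rw [pv_for_flatMap]
    simp only [List.append_nil, List.flatMap_eq_nil_iff]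
    intro y hy
    exact pv_for_gg_ne ent q x y (fun hh => h.1 hh.symm)
      (fun hh => h.2 (List.mem_map.mpr ⟨y, hy, hh⟩))

theorem pv_for_mid (ent : List (String × String)) (q : Int) (mq : String) :
    ∀ suf : List (Int × String), q ∉ suf.map Prod.fst →
    pvFor q (suf.flatMap (pvGG ent (q, mq)))
    = (suf.filter (fun p => decide ((mq, p.2) ∈ ent))).map (fun p => pvBellA q p.1) := by
  intro suf
  induction suf with
  | nil => intro _; simp [pvFor]
  | cons y suf ih =>
    intro h
    simp only [List.map_cons, List.mem_cons, not_or] at h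
    rw [List.flatMap_cons]
    simp only [pvFor, List.filterMap_append] at *
    rw [show (List.filterMap (fun op => if op.1 = q then some op.2 else none) (pvGG ent (q, mq) y))
        = pvFor q (pvGG ent (q, mq) y) from rfl,
      pv_for_gg_hit2 ent q mq y (fun hh => h.1 hh.symm), ih h.2, List.filter_cons]
    by_cases hc : (mq, y.2) ∈ ent <;> simp [hc]

-- one predecessor x contributes its singleton to q from the remaining items
theorem pv_for_pre_elt (ent : List (String × String)) (q : Int) (mq : String) (x : Int × String)
    (hx : x.1 ≠ q) :
    ∀ (pre suf : List (Int × String)), q ∉ pre.map Prod.fst → q ∉ suf.map Prod.fst →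
    pvFor q ((pre ++ (q, mq) :: suf).flatMap (pvGG ent x))
    = if (x.2, mq) ∈ ent then [pvBellA x.1 q] else [] := by
  intro pre suf hpre hsuf
  rw [pv_for_flatMap]
  rw [List.flatMap_append, List.flatMap_cons]
  have h1 : pre.flatMap (fun y => pvFor q (pvGG ent x y)) = [] := by
    simp only [List.flatMap_eq_nil_iff]
    intro y hy
    exact pv_for_gg_ne ent q x y hx (fun hh => hpre (List.mem_map.mpr ⟨y, hy, hh⟩))
  have h2 : suf.flatMap (fun y => pvFor q (pvGG ent x y)) = [] := by
    simp only [List.flatMap_eq_nil_iff]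
    intro y hy
    exact pv_for_gg_ne ent q x y hx (fun hh => hsuf (List.mem_map.mpr ⟨y, hy, hh⟩))
  rw [h1, h2, pv_for_gg_hit1 ent q mq x hx]
  simp

-- the full characterisation of the strings key q receives
theorem pv_ops_split (ent : List (String × String)) (q : Int) (mq : String) :
    ∀ (pre suf : List (Int × String)), q ∉ pre.map Prod.fst → q ∉ suf.map Prod.fst →
    pvFor q (pvOps ent (pre ++ (q, mq) :: suf))
    = (pre.filter (fun p => decide ((p.2, mq) ∈ ent))).map (fun p => pvBellA p.1 q)
      ++ (suf.filter (fun p => decide ((mq, p.2) ∈ ent))).map (fun p => pvBellA q p.1) := by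
  intro pre
  induction pre with
  | nil =>
    intro suf hpre hsuf
    show pvFor q (suf.flatMap (pvGG ent (q, mq)) ++ pvOps ent suf) = _
    simp only [pvFor, List.filterMap_append]
    rw [show (List.filterMap (fun op => if op.1 = q then some op.2 else none) (suf.flatMap (pvGG ent (q, mq))))
        = pvFor q (suf.flatMap (pvGG ent (q, mq))) from rfl,
      show (List.filterMap (fun op => if op.1 = q then some op.2 else none) (pvOps ent suf))
        = pvFor q (pvOps ent suf) from rfl,
      pv_for_mid ent q mq suf hsuf, pv_ops_none ent q suf hsuf]
    simp
  | cons x pre ih =>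
    intro suf hpre hsuf
    simp only [List.map_cons, List.mem_cons, not_or] at hpre
    have hx : x.1 ≠ q := fun hh => hpre.1 hh.symm
    show pvFor q ((pre ++ (q, mq) :: suf).flatMap (pvGG ent x) ++ pvOps ent (pre ++ (q, mq) :: suf)) = _
    simp only [pvFor, List.filterMap_append]
    rw [show (List.filterMap (fun op => if op.1 = q then some op.2 else none) ((pre ++ (q, mq) :: suf).flatMap (pvGG ent x)))
        = pvFor q ((pre ++ (q, mq) :: suf).flatMap (pvGG ent x)) from rfl,
      show (List.filterMap (fun op => if op.1 = q then some op.2 else none) (pvOps ent (pre ++ (q, mq) :: suf)))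
        = pvFor q (pvOps ent (pre ++ (q, mq) :: suf)) from rfl,
      pv_for_pre_elt ent q mq x hx pre suf hpre.2 hsuf, ih suf hpre.2 hsuf, List.filter_cons]
    by_cases hc : (x.2, mq) ∈ ent <;> simp [hc]

-- B's two scans as folds over filter-mapped lists
theorem pv_fold_push1 (ent : List (String × String)) (q : Int) (mq : String) :
    ∀ (l : List (Int × String)) (lst0 : List String),
    l.foldl (fun lst pm => if (pm.2, mq) ∈ ent then pvPushB lst (pvBellB pm.1 q) else lst) lst0
    = ((l.filter (fun p => decide ((p.2, mq) ∈ ent))).map (fun p => pvBellB p.1 q)).foldl pvPushB lst0 := by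
  intro l
  induction l with
  | nil => intro lst0; simp
  | cons pm l ih =>
    intro lst0
    rw [List.foldl_cons, List.filter_cons]
    by_cases h : (pm.2, mq) ∈ ent <;> simp [h, ih]

theorem pv_fold_push2 (ent : List (String × String)) (q : Int) (mq : String) :
    ∀ (l : List (Int × String)) (lst0 : List String),
    l.foldl (fun lst pm => if (mq, pm.2) ∈ ent then pvPushB lst (pvBellB q pm.1) else lst) lst0
    = ((l.filter (fun p => decide ((mq, p.2) ∈ ent))).map (fun p => pvBellB q p.1)).foldl pvPushB lst0 := by
  intro l
  induction l with
  | nil => intro lst0; simp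
  | cons pm l ih =>
    intro lst0
    rw [List.foldl_cons, List.filter_cons]
    by_cases h : (mq, pm.2) ∈ ent <;> simp [h, ih]

theorem pvBell_eq : pvBellB = pvBellA := rfl
theorem pvPush_eq : pvPushB = pvAppA := rfl

-- B's per-qubit entry equals the fold of the strings A sends to that qubit
theorem pv_entry_main (ent : List (String × String)) (ms : List (Int × String))
    (hnd : (ms.map Prod.fst).Nodup) (k : Nat) (hk : k < ms.length) :
    pvEntryB ent ms (k : Int) (ms[k].1) (ms[k].2)
    = (pvFor (ms[k].1) (pvOps ent ms)).foldl pvAppA [ms[k].2] := by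
  have hsplit : ms = ms.take k ++ ms[k] :: ms.drop (k + 1) := by
    conv_lhs => rw [← List.take_append_drop k ms]
    rw [List.drop_eq_getElem_cons hk]
  have hkeys : (ms.map Prod.fst) = (ms.take k).map Prod.fst ++ ms[k].1 :: (ms.drop (k + 1)).map Prod.fst := by
    have := congrArg (List.map Prod.fst) hsplit
    rwa [List.map_append, List.map_cons] at this
  rw [hkeys] at hnd
  rw [List.nodup_append] at hnd
  have hmem : ms[k].1 ∈ ms[k].1 :: (ms.drop (k + 1)).map Prod.fst := List.mem_cons_self
  have hpre : ms[k].1 ∉ (ms.take k).map Prod.fst := fun hin => hnd.2.2 _ hin _ hmem rfl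
  have hsuf : ms[k].1 ∉ (ms.drop (k + 1)).map Prod.fst := (List.nodup_cons.mp hnd.2.1).1
  unfold pvEntryB
  rw [PySem.List.slice_to_natCast, show ((k : Int) + 1) = ((k + 1 : Nat) : Int) by push_cast; ring,
    PySem.List.slice_from_natCast]
  rw [pv_fold_push1, pv_fold_push2]
  rw [← List.foldl_append]
  rw [congrArg (fun l => pvFor (ms[k].1) (pvOps ent l)) hsplit]
  rw [pv_ops_split ent (ms[k].1) (ms[k].2) (ms.take k) (ms.drop (k + 1)) hpre hsuf]
  rw [pvBell_eq, pvPush_eq]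

-- ===== VERDICT (by name: the statement is the Claim_ definition above) =====
theorem generate_entangled_measurements_spec : Claim_equal_generate_entangled_measurements := by
  unfold Claim_equal_generate_entangled_measurements
  intro ms entOpt _hdom hpre
  unfold Spec_generate_entangled_measurements
  unfold Pre_generate_entangled_measurements at hpre
  set ent := entOpt.getD [("X", "X"), ("Y", "Y"), ("Z", "Z")] with hent
  have hA : generate_entangled_measurements ms entOpt
      = ms.map (fun p => (p.1, (pvFor p.1 (pvOps ent ms)).foldl pvAppA [p.2])) := by
    show (PySem.List.enumerate ms 0).foldl _ (ms.map (fun p => (p.1, [p.2]))) = _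
    have h0 := pv_outer ent ms ms 0 (ms.map (fun p => (p.1, [p.2]))) (by simp)
    simp only [Nat.cast_zero] at h0
    rw [h0, pv_PF_apply, pv_apply_map ms (pvOps ent ms) hpre]
  have hB : generate_entangled_measurements_alt ms entOpt
      = (PySem.List.enumerate ms 0).map (fun kp => (kp.2.1, pvEntryB ent ms kp.1 kp.2.1 kp.2.2)) := rfl
  rw [hA, hB]
  apply List.ext_getElem
  · simp [PySem.List.length_enumerate]
  · intro k h1 h2
    simp only [List.getElem_map, PySem.List.getElem_enumerate]
    have hk : k < ms.length := by simpa using h1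
    have := pv_entry_main ent ms hpre k hk
    simp only [zero_add]
    rw [this]
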